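-- pv_equiv track=rewrite | github.com/sandeepkumar8713/pythonapps | 29_ninthFolder/20_group_cells.py | find_group_size
-- ===== SOURCE A (Python) =====
-- def find_group_size(inp_mat):
--     m = len(inp_mat)
--     n = len(inp_mat[0])
--     grp_size = 0
--     mark = [[-1] * n for _ in range(m)]
--
--     dx = [-1, 0, 1, 0]
--     dy = [0, 1, 0, -1]
--
--     def bfs(a, i, j):
--         if mark[i][j] == a or inp_mat[i][j] < a or inp_mat[i][j] > a + 1:
--             return 0
--
--         mark[i][j] = a
--         queue = []
--         queue.append((i, j))
--         r = 1
--         while len(queue) != 0: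
--             (x, y) = queue.pop(0)
--             for i in range(4):
--                 next_x = x + dx[i]
--                 next_y = y + dy[i]
--                 if 0 <= next_x < m and 0 <= next_y < n and \
--                         mark[next_x][next_y] != a and a <= inp_mat[next_x][next_y] <= a + 1:
--                     mark[next_x][next_y] = a
--                     queue.append((next_x, next_y))
--                     r += 1
--
--         return r
--
--     for a in range(0, 10):
--         for i in range(m):
--             for j in range(n):
--                 grp_size = max(grp_size, bfs(a, i, j))
--
--     return grp_size
-- ===== SOURCE B (Python) =====
-- def find_group_size(inp_mat):
--     m = len(inp_mat)
--     n = len(inp_mat[0])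
--     grp_size = 0
--     mark = [[-1] * n for _ in range(m)]
--
--     for a in range(10):
--         for si in range(m):
--             for sj in range(n):
--                 # iterative depth-first flood fill: push raw coordinates,
--                 # validate each cell only when it is popped
--                 stack = [(si, sj)]
--                 cnt = 0
--                 while stack:
--                     x, y = stack.pop()
--                     if 0 <= x < m and 0 <= y < n and mark[x][y] != a \
--                             and a <= inp_mat[x][y] <= a + 1:
--                         mark[x][y] = a
--                         cnt += 1
--                         stack.append((x - 1, y))
--                         stack.append((x, y + 1))
--                         stack.append((x + 1, y))
--                         stack.append((x, y - 1))
--                 if cnt > grp_size: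
--                     grp_size = cnt
--     return grp_size
-- ===== Notes on version B (the rewrite author's own statement) =====
-- stated objective: alternative
-- what changed: The mark-before-push BFS queue (list.pop(0)) is replaced by an iterative depth-first flood fill over an explicit stack that pushes raw neighbour coordinates unconditionally and validates each cell (bounds, mark, band) only when it is popped, counting at pop time; the running maximum is kept by comparison instead of max().
-- outside the precondition, e.g. on find_group_size([]): A raises IndexError, B raises IndexError; on find_group_size([[1, 2], [1]]): A raises IndexError, B raises IndexError
import Mathlib
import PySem

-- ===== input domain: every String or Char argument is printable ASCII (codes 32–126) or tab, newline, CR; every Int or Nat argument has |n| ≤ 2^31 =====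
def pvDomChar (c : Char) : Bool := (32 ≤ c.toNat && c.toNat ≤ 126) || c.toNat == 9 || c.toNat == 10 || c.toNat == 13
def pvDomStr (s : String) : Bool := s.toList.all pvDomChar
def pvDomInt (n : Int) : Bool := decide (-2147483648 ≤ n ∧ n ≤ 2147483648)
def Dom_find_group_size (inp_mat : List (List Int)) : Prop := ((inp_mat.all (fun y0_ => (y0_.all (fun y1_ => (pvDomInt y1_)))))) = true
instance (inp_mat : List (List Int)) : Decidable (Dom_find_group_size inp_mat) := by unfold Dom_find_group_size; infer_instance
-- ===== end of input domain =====

-- B replaces A's mark-before-push BFS (queue, pop(0)) by a validate-on-pop depth-first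
-- flood fill over an explicit stack; same return value (both programs also mutate only
-- their own local `mark`, so there are no observable side effects).

-- xs[i][j] / mark[x][y] — every access Python actually evaluates is bounds-guarded
-- (0 ≤ i < len), where `getD i.toNat` is exact; both ports use the same helper.
def pvCell (xs : List (List Int)) (i j : Int) : Int :=
  (xs.getD i.toNat []).getD j.toNat 0

-- mark[x][y] = v (only evaluated with in-range x, y)
def pvSet (xs : List (List Int)) (i j v : Int) : List (List Int) :=
  xs.set i.toNat ((xs.getD i.toNat []).set j.toNat v)

-- ===== PORT A =====
-- dx, dy zipped into one direction list
def pvDirs : List (Int × Int) := [(-1, 0), (0, 1), (1, 0), (0, -1)]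

-- the body of `for i in range(4): ...` : state = (mark, queue, r)
def bfsStepA (inp_mat : List (List Int)) (m n a x y : Int)
    (st : List (List Int) × List (Int × Int) × Int) (d : Int × Int) :
    List (List Int) × List (Int × Int) × Int :=
  let nx := x + d.1
  let ny := y + d.2
  if 0 ≤ nx ∧ nx < m ∧ 0 ≤ ny ∧ ny < n ∧ pvCell st.1 nx ny ≠ a ∧
      a ≤ pvCell inp_mat nx ny ∧ pvCell inp_mat nx ny ≤ a + 1 then
    (pvSet st.1 nx ny a, st.2.1 ++ [(nx, ny)], st.2.2 + 1)
  else st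

-- `while len(queue) != 0:` — fuel m*n+1 is provably sufficient (each iteration pops one
-- element, and every push is paired with a fresh marking, of which there are ≤ m*n)
def bfsLoopA (inp_mat : List (List Int)) (m n a : Int) :
    Nat → List (List Int) → List (Int × Int) → Int → Int × List (List Int)
  | 0, mark, _, r => (r, mark)
  | fuel + 1, mark, queue, r =>
    match queue with
    | [] => (r, mark)
    | (x, y) :: rest =>
      let st := pvDirs.foldl (bfsStepA inp_mat m n a x y) (mark, rest, r)
      bfsLoopA inp_mat m n a fuel st.1 st.2.1 st.2.2

-- def bfs(a, i, j)
def bfsA (inp_mat : List (List Int)) (m n a i j : Int) (mark : List (List Int)) :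
    Int × List (List Int) :=
  if pvCell mark i j = a ∨ pvCell inp_mat i j < a ∨ a + 1 < pvCell inp_mat i j then
    (0, mark)
  else
    bfsLoopA inp_mat m n a (m.toNat * n.toNat + 1) (pvSet mark i j a) [(i, j)] 1

def find_group_size (inp_mat : List (List Int)) : Int :=
  let m : Int := inp_mat.length
  let n : Int := (inp_mat.getD 0 []).length     -- len(inp_mat[0]); Python raises on [], excluded by Pre_
  let mark0 : List (List Int) :=
    List.replicate inp_mat.length (List.replicate (inp_mat.getD 0 []).length (-1))
  let st := (PySem.List.pyRange 0 10 1).foldl (fun st a =>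
    (PySem.List.pyRange 0 m 1).foldl (fun st i =>
      (PySem.List.pyRange 0 n 1).foldl (fun st j =>
        let res := bfsA inp_mat m n a i j st.2
        (max st.1 res.1, res.2)) st) st) ((0 : Int), mark0)
  st.1

-- ===== PORT B =====
-- `while stack:` — the head of the list is the top of the stack (Python pushes
-- (x-1,y),(x,y+1),(x+1,y),(x,y-1) at the end and pops from the end, so (x,y-1) is on
-- top); fuel 4*m*n+1 is provably sufficient (each iteration pops one element, and
-- pushes happen in blocks of 4 paired with a fresh marking).
def dfsLoopB (inp_mat : List (List Int)) (m n a : Int) :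
    Nat → List (List Int) → List (Int × Int) → Int → Int × List (List Int)
  | 0, mark, _, cnt => (cnt, mark)
  | fuel + 1, mark, stack, cnt =>
    match stack with
    | [] => (cnt, mark)
    | (x, y) :: rest =>
      if 0 ≤ x ∧ x < m ∧ 0 ≤ y ∧ y < n ∧ pvCell mark x y ≠ a ∧
          a ≤ pvCell inp_mat x y ∧ pvCell inp_mat x y ≤ a + 1 then
        dfsLoopB inp_mat m n a fuel (pvSet mark x y a)
          ((x, y - 1) :: (x + 1, y) :: (x, y + 1) :: (x - 1, y) :: rest) (cnt + 1)
      else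
        dfsLoopB inp_mat m n a fuel mark rest cnt

def find_group_size_alt (inp_mat : List (List Int)) : Int :=
  let m : Int := inp_mat.length
  let n : Int := (inp_mat.getD 0 []).length
  let mark0 : List (List Int) :=
    List.replicate inp_mat.length (List.replicate (inp_mat.getD 0 []).length (-1))
  let st := (PySem.List.pyRange 0 10 1).foldl (fun st a =>
    (PySem.List.pyRange 0 m 1).foldl (fun st si =>
      (PySem.List.pyRange 0 n 1).foldl (fun st sj =>
        let res := dfsLoopB inp_mat m n a
          (4 * inp_mat.length * (inp_mat.getD 0 []).length + 1) st.2 [(si, sj)] 0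
        (if res.1 > st.1 then res.1 else st.1, res.2)) st) st) ((0 : Int), mark0)
  st.1

-- ===== PRECONDITION & SPEC =====
-- Python A raises IndexError on [] (inp_mat[0]) and whenever some row is shorter than
-- row 0 (inp_mat[i][j] is read for every j < len(inp_mat[0])); exactly those inputs are
-- excluded.  Rows longer than row 0 are fine (the extra columns are never touched).
def Pre_find_group_size (inp_mat : List (List Int)) : Prop :=
  inp_mat ≠ [] ∧ ∀ row ∈ inp_mat, (inp_mat.getD 0 []).length ≤ row.length
instance (inp_mat : List (List Int)) : Decidable (Pre_find_group_size inp_mat) := by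
  unfold Pre_find_group_size; infer_instance

def pvWitness_find_group_size : List (List Int) := [[0, 1], [2, 1]]

def Spec_find_group_size (inp_mat : List (List Int)) (out : Int) : Prop :=
  out = find_group_size_alt inp_mat
instance (inp_mat : List (List Int)) (out : Int) : Decidable (Spec_find_group_size inp_mat out) := by
  unfold Spec_find_group_size; infer_instance

-- ===== CLAIM (what is proved, stated in full; the proofs are below) =====
def Claim_equal_find_group_size : Prop :=
  ∀ (inp_mat : List (List Int)), Dom_find_group_size inp_mat →
    Pre_find_group_size inp_mat → Spec_find_group_size inp_mat (find_group_size inp_mat)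

-- ===== LEMMAS AND PROOFS =====

-- Proof-side abstractions -----------------------------------------------------

def pvInG (mat : List (List Int)) (p : Int × Int) : Prop :=
  0 ≤ p.1 ∧ p.1 < (mat.length : Int) ∧ 0 ≤ p.2 ∧ p.2 < ((mat.getD 0 []).length : Int)

def pvGood (mat : List (List Int)) (a : Int) (p : Int × Int) : Prop :=
  pvInG mat p ∧ a ≤ pvCell mat p.1 p.2 ∧ pvCell mat p.1 p.2 ≤ a + 1

def pvAdj (p q : Int × Int) : Prop := ∃ d ∈ pvDirs, q = (p.1 + d.1, p.2 + d.2)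

def pvStepR (mat : List (List Int)) (a : Int) (S : Set (Int × Int)) (p q : Int × Int) : Prop :=
  pvAdj p q ∧ pvGood mat a q ∧ q ∉ S

def pvReach (mat : List (List Int)) (a : Int) (S : Set (Int × Int)) (c : Int × Int) :
    Set (Int × Int) :=
  {q | Relation.ReflTransGen (pvStepR mat a S) c q}

def pvMkS (mat : List (List Int)) (a : Int) (mk : List (List Int)) : Set (Int × Int) :=
  {p | pvInG mat p ∧ pvCell mk p.1 p.2 = a}

def pvShape (mat mk : List (List Int)) : Prop :=
  mk.length = mat.length ∧ ∀ row ∈ mk, row.length = (mat.getD 0 []).length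

def pvCnt (a : Int) (mk : List (List Int)) : Nat := (mk.map (fun row => row.count a)).sum

-- Primitive lemmas on pvCell / pvSet / pvCnt ----------------------------------

theorem pvCell_natCast (mk : List (List Int)) (i j : Nat) :
    pvCell mk (i : Int) (j : Int) = (mk.getD i []).getD j 0 := by
  simp [pvCell]

theorem pvShape_set (mat mk : List (List Int)) (i j v : Int) (hs : pvShape mat mk) :
    pvShape mat (pvSet mk i j v) := by
  obtain ⟨h1, h2⟩ := hs
  by_cases hi : i.toNat < mk.length
  · refine ⟨by simp [pvSet, h1], ?_⟩
    intro row hrow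
    rcases List.mem_or_eq_of_mem_set hrow with h | h
    · exact h2 row h
    · subst h
      rw [List.length_set, List.getD_eq_getElem _ _ hi]
      exact h2 _ (List.getElem_mem hi)
  · rw [pvSet, List.set_eq_of_length_le (by omega)]
    exact ⟨h1, h2⟩

theorem pvCell_set_self (mat mk : List (List Int)) (hs : pvShape mat mk)
    (p : Int × Int) (hp : pvInG mat p) (v : Int) :
    pvCell (pvSet mk p.1 p.2 v) p.1 p.2 = v := by
  obtain ⟨h1, h2⟩ := hs
  obtain ⟨hp1, hp2, hp3, hp4⟩ := hp
  have hi : p.1.toNat < mk.length := by omega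
  have hrmem : (mk.getD p.1.toNat []) ∈ mk := by
    rw [List.getD_eq_getElem _ _ hi]; exact List.getElem_mem hi
  have hj : p.2.toNat < (mk.getD p.1.toNat []).length := by
    rw [h2 _ hrmem]; omega
  have e1 : (pvSet mk p.1 p.2 v).getD p.1.toNat []
      = (mk.getD p.1.toNat []).set p.2.toNat v := by
    rw [pvSet, List.getD_eq_getElem _ _ (by simpa using hi), List.getElem_set_self]
  show ((pvSet mk p.1 p.2 v).getD p.1.toNat []).getD p.2.toNat 0 = v
  rw [e1, List.getD_eq_getElem _ _ (by simpa using hj), List.getElem_set_self]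

theorem pvCell_set_other (mat mk : List (List Int)) (hs : pvShape mat mk)
    (p q : Int × Int) (hp : pvInG mat p) (hq : pvInG mat q) (hne : q ≠ p) (v : Int) :
    pvCell (pvSet mk p.1 p.2 v) q.1 q.2 = pvCell mk q.1 q.2 := by
  obtain ⟨h1, h2⟩ := hs
  obtain ⟨hp1, hp2, hp3, hp4⟩ := hp
  obtain ⟨hq1, hq2, hq3, hq4⟩ := hq
  have hi : p.1.toNat < mk.length := by omega
  show ((pvSet mk p.1 p.2 v).getD q.1.toNat []).getD q.2.toNat 0
      = (mk.getD q.1.toNat []).getD q.2.toNat 0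
  by_cases hrow : p.1.toNat = q.1.toNat
  · have hcol : p.2.toNat ≠ q.2.toNat := by
      have hpq1 : p.1 = q.1 := by omega
      have hpq2 : p.2 ≠ q.2 := by
        intro h; exact hne (Prod.ext (by omega) (by omega)).symm
      omega
    have e1 : (pvSet mk p.1 p.2 v).getD q.1.toNat []
        = (mk.getD p.1.toNat []).set p.2.toNat v := by
      rw [pvSet, ← hrow, List.getD_eq_getElem _ _ (by simpa using hi), List.getElem_set_self]
    rw [e1, List.getD_eq_getElem?_getD, List.getElem?_set_ne hcol,
      ← List.getD_eq_getElem?_getD, ← hrow]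
  · have e1 : (pvSet mk p.1 p.2 v).getD q.1.toNat [] = mk.getD q.1.toNat [] := by
      rw [pvSet, List.getD_eq_getElem?_getD, List.getElem?_set_ne hrow,
        ← List.getD_eq_getElem?_getD]
    rw [e1]

theorem count_set_of_ne (row : List Int) (a : Int) :
    ∀ (j : Nat), j < row.length → row[j]? ≠ some a →
      (row.set j a).count a = row.count a + 1 := by
  induction row with
  | nil => intro j h; simp at h
  | cons r rs ih =>
    intro j hj hv
    cases j with
    | zero =>
      simp only [List.set_cons_zero, List.count_cons] at *
      have : r ≠ a := by simpa using hv
      simp [this]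
    | succ j =>
      simp only [List.set_cons_succ, List.count_cons]
      rw [ih j (by simpa using hj) (by simpa using hv)]
      omega

theorem sum_set_nat (l : List Nat) : ∀ (i : Nat) (x : Nat) (h : i < l.length),
    (l.set i x).sum + l[i]'h = l.sum + x := by
  induction l with
  | nil => intro i x h; simp at h
  | cons b bs ih =>
    intro i x h
    cases i with
    | zero => simp [List.set_cons_zero]; omega
    | succ i =>
      simp only [List.set_cons_succ, List.sum_cons, List.getElem_cons_succ]
      have := ih i x (by simpa using h)
      omega

theorem pvCnt_set (mat mk : List (List Int)) (hs : pvShape mat mk)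
    (p : Int × Int) (hp : pvInG mat p) (a : Int) (hv : pvCell mk p.1 p.2 ≠ a) :
    pvCnt a (pvSet mk p.1 p.2 a) = pvCnt a mk + 1 := by
  obtain ⟨h1, h2⟩ := hs
  obtain ⟨hp1, hp2, hp3, hp4⟩ := hp
  have hi : p.1.toNat < mk.length := by omega
  have hrow : mk.getD p.1.toNat [] = mk[p.1.toNat] := List.getD_eq_getElem _ _ hi
  have hmem : mk[p.1.toNat] ∈ mk := List.getElem_mem hi
  have hj : p.2.toNat < mk[p.1.toNat].length := by rw [h2 _ hmem]; omega
  have hcell : mk[p.1.toNat][p.2.toNat]? ≠ some a := by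
    rw [List.getElem?_eq_getElem hj]
    intro h
    apply hv
    rw [pvCell, hrow, List.getD_eq_getElem _ _ hj]
    simpa using h
  have hcount : ((mk.getD p.1.toNat []).set p.2.toNat a).count a
      = mk[p.1.toNat].count a + 1 := by
    rw [hrow]; exact count_set_of_ne _ _ _ hj hcell
  have hmap : (List.map (fun row => row.count a) (pvSet mk p.1 p.2 a))
      = (List.map (fun row => row.count a) mk).set p.1.toNat
          (((mk.getD p.1.toNat []).set p.2.toNat a).count a) := by
    rw [pvSet, List.map_set]
  have hlen : p.1.toNat < (List.map (fun row => row.count a) mk).length := by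
    simpa using hi
  have hget : (List.map (fun row => row.count a) mk)[p.1.toNat] = mk[p.1.toNat].count a := by
    simp
  have := sum_set_nat (List.map (fun row => row.count a) mk) p.1.toNat
    (((mk.getD p.1.toNat []).set p.2.toNat a).count a) hlen
  rw [pvCnt, pvCnt, hmap]
  rw [hget] at this
  omega

theorem pvCnt_le (mat mk : List (List Int)) (hs : pvShape mat mk) (a : Int) :
    pvCnt a mk ≤ mat.length * (mat.getD 0 []).length := by
  obtain ⟨h1, h2⟩ := hs
  rw [← h1]
  clear h1
  induction mk with
  | nil => simp [pvCnt]
  | cons r rs ih =>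
    simp only [pvCnt, List.map_cons, List.sum_cons, List.length_cons]
    have hr : r.count a ≤ (mat.getD 0 []).length := by
      calc r.count a ≤ r.length := List.count_le_length
        _ = _ := h2 r List.mem_cons_self
    have := ih (fun row h => h2 row (List.mem_cons_of_mem _ h))
    rw [pvCnt] at this
    calc r.count a + (rs.map (fun row => row.count a)).sum
        ≤ (mat.getD 0 []).length + rs.length * (mat.getD 0 []).length := by omega
      _ = (rs.length + 1) * (mat.getD 0 []).length := by ring

theorem pvMkS_set (mat mk : List (List Int)) (hs : pvShape mat mk)
    (p : Int × Int) (hp : pvInG mat p) (a : Int) :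
    pvMkS mat a (pvSet mk p.1 p.2 a) = pvMkS mat a mk ∪ {p} := by
  ext q
  simp only [pvMkS, Set.mem_setOf_eq, Set.mem_union, Set.mem_singleton_iff]
  constructor
  · rintro ⟨hq, hcell⟩
    by_cases hqp : q = p
    · exact Or.inr hqp
    · left
      exact ⟨hq, by rwa [pvCell_set_other mat mk ⟨hs.1, hs.2⟩ p q hp hq hqp a] at hcell⟩
  · rintro (⟨hq, hcell⟩ | hqp)
    · by_cases hqp : q = p
      · subst hqp
        exact ⟨hq, pvCell_set_self mat mk hs q hq a⟩
      · exact ⟨hq, by rwa [pvCell_set_other mat mk hs p q hp hq hqp a]⟩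
    · subst hqp
      exact ⟨hp, pvCell_set_self mat mk hs q hp a⟩

theorem pvShape_ext (mat u v : List (List Int)) (hu : pvShape mat u) (hv : pvShape mat v)
    (h : ∀ p, pvInG mat p → pvCell u p.1 p.2 = pvCell v p.1 p.2) : u = v := by
  obtain ⟨hu1, hu2⟩ := hu
  obtain ⟨hv1, hv2⟩ := hv
  apply List.ext_getElem (by omega)
  intro i hiu hiv
  apply List.ext_getElem
  · rw [hu2 _ (List.getElem_mem hiu), hv2 _ (List.getElem_mem hiv)]
  intro j hju hjv
  have hrowlen : u[i].length = (mat.getD 0 []).length := hu2 _ (List.getElem_mem hiu)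
  have hIG : pvInG mat ((i : Int), (j : Int)) := ⟨by omega, by omega, by omega, by omega⟩
  have cu : pvCell u (i : Int) (j : Int) = u[i][j] := by
    rw [pvCell_natCast, show u.getD i ([] : List Int) = u[i] from List.getD_eq_getElem _ _ hiu,
      List.getD_eq_getElem _ _ hju]
  have cv : pvCell v (i : Int) (j : Int) = v[i][j] := by
    rw [pvCell_natCast, show v.getD i ([] : List Int) = v[i] from List.getD_eq_getElem _ _ hiv,
      List.getD_eq_getElem _ _ hjv]
  have := h ((i : Int), (j : Int)) hIG
  rw [cu, cv] at this
  exact this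

-- Reachability facts ------------------------------------------------------------

def pvN (mat : List (List Int)) : Nat := mat.length * (mat.getD 0 []).length

theorem pvReach_not_S (mat : List (List Int)) (a : Int) (S : Set (Int × Int))
    (c : Int × Int) (hc : c ∉ S) : ∀ q ∈ pvReach mat a S c, q ∉ S := by
  intro q hq
  induction hq with
  | refl => exact hc
  | tail h₁ h₂ ih => exact h₂.2.2

theorem pvReach_sub_MkS (mat : List (List Int)) (a : Int) (S0 : Set (Int × Int))
    (c : Int × Int) (mark : List (List Int)) (hc : c ∉ S0)
    (hcM : c ∈ pvMkS mat a mark)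
    (hclosed : ∀ p ∈ pvMkS mat a mark, p ∉ S0 → ∀ q, pvStepR mat a S0 p q →
      q ∈ pvMkS mat a mark) :
    pvReach mat a S0 c ⊆ pvMkS mat a mark := by
  intro q hq
  induction hq with
  | refl => exact hcM
  | tail h₁ h₂ ih =>
    rename_i x q'
    exact hclosed x ih (pvReach_not_S mat a S0 c hc x h₁) q' h₂

-- BFS loop invariant ------------------------------------------------------------

def pvFInvA (mat : List (List Int)) (a : Int) (S0 : Set (Int × Int)) (c : Int × Int)
    (mark0 : List (List Int)) (x : Int × Int)
    (mark : List (List Int)) (queue : List (Int × Int)) : Prop :=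
  pvShape mat mark ∧
  (∀ p ∈ queue, p ∈ pvMkS mat a mark ∧ p ∉ S0) ∧
  S0 ⊆ pvMkS mat a mark ∧
  pvMkS mat a mark ⊆ S0 ∪ pvReach mat a S0 c ∧
  (∀ p ∈ pvMkS mat a mark, p ∉ S0 → p ∉ queue → p ≠ x →
      ∀ q, pvStepR mat a S0 p q → q ∈ pvMkS mat a mark) ∧
  c ∈ pvMkS mat a mark ∧
  (∀ p, pvInG mat p → p ∉ pvReach mat a S0 c → pvCell mark p.1 p.2 = pvCell mark0 p.1 p.2) ∧
  x ∈ pvMkS mat a mark ∧ x ∉ S0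

theorem foldA_spec (mat : List (List Int)) (a : Int) (S0 : Set (Int × Int))
    (c : Int × Int) (mark0 : List (List Int)) (x : Int × Int) :
    ∀ (ds : List (Int × Int)), (∀ d ∈ ds, d ∈ pvDirs) →
    ∀ (mark : List (List Int)) (queue : List (Int × Int)) (r : Int),
    pvFInvA mat a S0 c mark0 x mark queue →
    (pvFInvA mat a S0 c mark0 x
        (ds.foldl (bfsStepA mat (mat.length : Int) ((mat.getD 0 []).length : Int) a x.1 x.2)
          (mark, queue, r)).1
        (ds.foldl (bfsStepA mat (mat.length : Int) ((mat.getD 0 []).length : Int) a x.1 x.2)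
          (mark, queue, r)).2.1) ∧
    pvMkS mat a mark ⊆ pvMkS mat a
        (ds.foldl (bfsStepA mat (mat.length : Int) ((mat.getD 0 []).length : Int) a x.1 x.2)
          (mark, queue, r)).1 ∧
    (ds.foldl (bfsStepA mat (mat.length : Int) ((mat.getD 0 []).length : Int) a x.1 x.2)
          (mark, queue, r)).2.2
      = r + ((pvCnt a (ds.foldl (bfsStepA mat (mat.length : Int) ((mat.getD 0 []).length : Int) a x.1 x.2)
          (mark, queue, r)).1 : Int) - (pvCnt a mark : Int)) ∧
    ((((ds.foldl (bfsStepA mat (mat.length : Int) ((mat.getD 0 []).length : Int) a x.1 x.2)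
          (mark, queue, r)).2.1).length : Int)
        - (pvCnt a (ds.foldl (bfsStepA mat (mat.length : Int) ((mat.getD 0 []).length : Int) a x.1 x.2)
          (mark, queue, r)).1 : Int)
      = (queue.length : Int) - (pvCnt a mark : Int)) ∧
    ((∀ q', pvStepR mat a S0 x q' →
        q' ∈ pvMkS mat a mark ∨ ∃ d ∈ ds, q' = (x.1 + d.1, x.2 + d.2)) →
      ∀ q', pvStepR mat a S0 x q' →
        q' ∈ pvMkS mat a
          (ds.foldl (bfsStepA mat (mat.length : Int) ((mat.getD 0 []).length : Int) a x.1 x.2)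
            (mark, queue, r)).1) := by
  intro ds
  induction ds with
  | nil =>
    intro _ mark queue r hInv
    refine ⟨hInv, fun p hp => hp, by simp, by simp, ?_⟩
    intro hprem q' hstep
    rcases hprem q' hstep with h | ⟨d, hd, _⟩
    · exact h
    · simp at hd
  | cons d ds ih =>
    intro hds mark queue r hInv
    simp only [List.foldl_cons]
    by_cases hg : (0 ≤ x.1 + d.1 ∧ x.1 + d.1 < (mat.length : Int) ∧ 0 ≤ x.2 + d.2 ∧
        x.2 + d.2 < ((mat.getD 0 []).length : Int) ∧ pvCell mark (x.1 + d.1) (x.2 + d.2) ≠ a ∧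
        a ≤ pvCell mat (x.1 + d.1) (x.2 + d.2) ∧ pvCell mat (x.1 + d.1) (x.2 + d.2) ≤ a + 1)
    · -- the neighbour gets marked and pushed
      have hstep1 : bfsStepA mat (mat.length : Int) ((mat.getD 0 []).length : Int) a x.1 x.2
          (mark, queue, r) d
          = (pvSet mark (x.1 + d.1) (x.2 + d.2) a, queue ++ [(x.1 + d.1, x.2 + d.2)], r + 1) := by
        simp only [bfsStepA, if_pos hg]
      rw [hstep1]
      obtain ⟨hsh, hqOK, hS0, hsub, hcl, hcM, hunch, hxM, hxS0⟩ := hInv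
      set q : Int × Int := (x.1 + d.1, x.2 + d.2) with hq
      have hqIG : pvInG mat q := ⟨hg.1, hg.2.1, hg.2.2.1, hg.2.2.2.1⟩
      have hcell : pvCell mark q.1 q.2 ≠ a := hg.2.2.2.2.1
      have hqnM : q ∉ pvMkS mat a mark := fun h => hcell h.2
      have hqnS0 : q ∉ S0 := fun h => hqnM (hS0 h)
      have hxR : x ∈ pvReach mat a S0 c := by
        rcases hsub hxM with h | h
        · exact absurd h hxS0
        · exact h
      have hstepxq : pvStepR mat a S0 x q :=
        ⟨⟨d, hds d List.mem_cons_self, rfl⟩, ⟨hqIG, hg.2.2.2.2.2.1, hg.2.2.2.2.2.2⟩, hqnS0⟩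
      have hqR : q ∈ pvReach mat a S0 c := Relation.ReflTransGen.tail hxR hstepxq
      have hsh' : pvShape mat (pvSet mark q.1 q.2 a) := pvShape_set mat mark q.1 q.2 a hsh
      have hMkS' : pvMkS mat a (pvSet mark q.1 q.2 a) = pvMkS mat a mark ∪ {q} :=
        pvMkS_set mat mark hsh q hqIG a
      have hmono : pvMkS mat a mark ⊆ pvMkS mat a (pvSet mark q.1 q.2 a) := by
        rw [hMkS']; exact Set.subset_union_left
      have hqM' : q ∈ pvMkS mat a (pvSet mark q.1 q.2 a) := by rw [hMkS']; right; rfl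
      have hInv' : pvFInvA mat a S0 c mark0 x (pvSet mark q.1 q.2 a) (queue ++ [q]) := by
        refine ⟨hsh', ?_, ?_, ?_, ?_, hmono hcM, ?_, hmono hxM, hxS0⟩
        · intro p hp
          rcases List.mem_append.mp hp with hp | hp
          · exact ⟨hmono (hqOK p hp).1, (hqOK p hp).2⟩
          · simp only [List.mem_singleton] at hp; subst hp; exact ⟨hqM', hqnS0⟩
        · exact fun p hp => hmono (hS0 hp)
        · rw [hMkS']
          rintro p (hp | hp)
          · exact hsub hp
          · simp only [Set.mem_singleton_iff] at hp; subst hp; exact Or.inr hqR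
        · intro p hpM hpS0 hpq hpx q2 hs
          rw [hMkS'] at hpM ⊢
          rcases hpM with hpM | hpM
          · have hpq2 : p ∉ queue := fun h => hpq (List.mem_append_left _ h)
            exact Or.inl (hcl p hpM hpS0 hpq2 hpx q2 hs)
          · simp only [Set.mem_singleton_iff] at hpM; subst hpM
            exact absurd (List.mem_append_right _ (by simp)) hpq
        · intro p hpIG hpR
          have hpq : p ≠ q := fun h => hpR (h ▸ hqR)
          rw [pvCell_set_other mat mark hsh q p hqIG hpIG hpq a]
          exact hunch p hpIG hpR
      have hcnt' : pvCnt a (pvSet mark q.1 q.2 a) = pvCnt a mark + 1 :=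
        pvCnt_set mat mark hsh q hqIG a hcell
      obtain ⟨h1, h2, h3, h4, h5⟩ := ih (fun d' hd' => hds d' (List.mem_cons_of_mem _ hd'))
        (pvSet mark q.1 q.2 a) (queue ++ [q]) (r + 1) hInv'
      refine ⟨h1, fun p hp => h2 (hmono hp), by rw [h3, hcnt']; push_cast; ring,
        by rw [h4, hcnt']; simp only [List.length_append, List.length_cons,
          List.length_nil]; push_cast; ring, ?_⟩
      intro hprem
      apply h5
      intro q' hstep'
      rcases hprem q' hstep' with h | ⟨d', hd', he⟩
      · exact Or.inl (hmono h)
      · rcases List.mem_cons.mp hd' with rfl | hd'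
        · exact Or.inl (he ▸ hqM')
        · exact Or.inr ⟨d', hd', he⟩
    · have hstep1 : bfsStepA mat (mat.length : Int) ((mat.getD 0 []).length : Int) a x.1 x.2
          (mark, queue, r) d = (mark, queue, r) := by
        simp only [bfsStepA, if_neg hg]
      rw [hstep1]
      obtain ⟨h1, h2, h3, h4, h5⟩ := ih (fun d' hd' => hds d' (List.mem_cons_of_mem _ hd'))
        mark queue r hInv
      refine ⟨h1, h2, h3, h4, ?_⟩
      intro hprem
      apply h5
      intro q' hstep'
      rcases hprem q' hstep' with h | ⟨d', hd', he⟩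
      · exact Or.inl h
      · rcases List.mem_cons.mp hd' with rfl | hd'
        · -- q' = x + d but the guard failed: its mark must already be a
          left
          obtain ⟨hadj, hgood, hq'S0⟩ := hstep'
          subst he
          by_contra hq'M
          apply hg
          obtain ⟨⟨g1, g2, g3, g4⟩, g5, g6⟩ := hgood
          exact ⟨g1, g2, g3, g4, fun hcc => hq'M ⟨⟨g1, g2, g3, g4⟩, hcc⟩, g5, g6⟩
        · exact Or.inr ⟨d', hd', he⟩

def pvInvA (mat : List (List Int)) (a : Int) (S0 : Set (Int × Int)) (c : Int × Int)
    (mark0 : List (List Int)) (mark : List (List Int)) (queue : List (Int × Int)) : Prop :=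
  pvShape mat mark ∧
  (∀ p ∈ queue, p ∈ pvMkS mat a mark ∧ p ∉ S0) ∧
  S0 ⊆ pvMkS mat a mark ∧
  pvMkS mat a mark ⊆ S0 ∪ pvReach mat a S0 c ∧
  (∀ p ∈ pvMkS mat a mark, p ∉ S0 → p ∉ queue →
      ∀ q, pvStepR mat a S0 p q → q ∈ pvMkS mat a mark) ∧
  c ∈ pvMkS mat a mark ∧
  (∀ p, pvInG mat p → p ∉ pvReach mat a S0 c → pvCell mark p.1 p.2 = pvCell mark0 p.1 p.2)

def pvConcl (mat : List (List Int)) (a : Int) (S0 : Set (Int × Int)) (c : Int × Int)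
    (mark0 mark : List (List Int)) (r : Int) (out : Int × List (List Int)) : Prop :=
  pvShape mat out.2 ∧
  (∀ p, pvInG mat p → p ∉ pvReach mat a S0 c → pvCell out.2 p.1 p.2 = pvCell mark0 p.1 p.2) ∧
  pvMkS mat a out.2 = S0 ∪ pvReach mat a S0 c ∧
  out.1 = r + ((pvCnt a out.2 : Int) - (pvCnt a mark : Int))

theorem pvConcl_of_done (mat : List (List Int)) (a : Int) (S0 : Set (Int × Int))
    (c : Int × Int) (mark0 mark : List (List Int)) (r : Int) (hc : c ∉ S0)
    (hInv : pvInvA mat a S0 c mark0 mark []) :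
    pvConcl mat a S0 c mark0 mark r (r, mark) := by
  obtain ⟨hsh, _, hS0, hsub, hcl, hcM, hunch⟩ := hInv
  refine ⟨hsh, hunch, ?_, by simp⟩
  apply Set.Subset.antisymm hsub
  rintro p (hp | hp)
  · exact hS0 hp
  · exact pvReach_sub_MkS mat a S0 c mark hc hcM
      (fun p hpM hpS0 q hs => hcl p hpM hpS0 (List.not_mem_nil) q hs) hp

theorem bfsLoopA_spec (mat : List (List Int)) (a : Int) (S0 : Set (Int × Int))
    (c : Int × Int) (mark0 : List (List Int)) (hc : c ∉ S0) :
    ∀ (fuel : Nat) (mark : List (List Int)) (queue : List (Int × Int)) (r : Int),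
    pvInvA mat a S0 c mark0 mark queue →
    queue.length + (pvN mat - pvCnt a mark) ≤ fuel →
    pvConcl mat a S0 c mark0 mark r
      (bfsLoopA mat (mat.length : Int) ((mat.getD 0 []).length : Int) a fuel mark queue r) := by
  intro fuel
  induction fuel with
  | zero =>
    intro mark queue r hInv hfuel
    have hq : queue = [] := by
      cases queue with
      | nil => rfl
      | cons p ps => simp at hfuel
    subst hq
    exact pvConcl_of_done mat a S0 c mark0 mark r hc hInv
  | succ fuel ih =>
    intro mark queue r hInv hfuel
    cases queue with
    | nil =>
      exact pvConcl_of_done mat a S0 c mark0 mark r hc hInv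
    | cons xy rest =>
      obtain ⟨x, y⟩ := xy
      simp only [bfsLoopA]
      obtain ⟨hsh, hqOK, hS0, hsub, hcl, hcM, hunch⟩ := hInv
      have hxM := (hqOK (x, y) List.mem_cons_self).1
      have hxS0 := (hqOK (x, y) List.mem_cons_self).2
      have hFInv : pvFInvA mat a S0 c mark0 (x, y) mark rest := by
        refine ⟨hsh, fun p hp => hqOK p (List.mem_cons_of_mem _ hp), hS0, hsub, ?_, hcM,
          hunch, hxM, hxS0⟩
        intro p hpM hpS0 hprest hpx q hs
        exact hcl p hpM hpS0 (by simp [hprest, hpx]) q hs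
      obtain ⟨hF1, hF2, hF3, hF4, hF5⟩ := foldA_spec mat a S0 c mark0 (x, y) pvDirs
        (fun d hd => hd) mark rest r hFInv
      set st := pvDirs.foldl
        (bfsStepA mat (mat.length : Int) ((mat.getD 0 []).length : Int) a x y)
        (mark, rest, r) with hst
      have hxclosed : ∀ q', pvStepR mat a S0 (x, y) q' → q' ∈ pvMkS mat a st.1 := by
        apply hF5
        intro q' hstep'
        obtain ⟨⟨d, hd, he⟩, _, _⟩ := hstep'
        exact Or.inr ⟨d, hd, he⟩
      obtain ⟨hF1a, hF1b, hF1c, hF1d, hF1e, hF1f, hF1g, hF1h, hF1i⟩ := hF1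
      have hInv' : pvInvA mat a S0 c mark0 st.1 st.2.1 := by
        refine ⟨hF1a, hF1b, hF1c, hF1d, ?_, hF1f, hF1g⟩
        intro p hpM hpS0 hpq q hs
        by_cases hpx : p = (x, y)
        · subst hpx; exact hxclosed q hs
        · exact hF1e p hpM hpS0 hpq hpx q hs
      have hcle1 := pvCnt_le mat st.1 hF1a a
      have hcle2 := pvCnt_le mat mark hsh a
      have hfuel' : st.2.1.length + (pvN mat - pvCnt a st.1) ≤ fuel := by
        simp only [List.length_cons] at hfuel
        rw [pvN] at *
        omega
      have := ih st.1 st.2.1 st.2.2 hInv' hfuel'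
      obtain ⟨hC1, hC2, hC3, hC4⟩ := this
      refine ⟨hC1, hC2, hC3, ?_⟩
      rw [hC4, hF3]
      ring

-- DFS (stack) loop invariant ------------------------------------------------------

def pvInvB (mat : List (List Int)) (a : Int) (S0 : Set (Int × Int)) (c : Int × Int)
    (mark0 : List (List Int)) (mark : List (List Int)) (stack : List (Int × Int)) : Prop :=
  pvShape mat mark ∧
  (∀ q ∈ stack, q = c ∨ ∃ x ∈ pvReach mat a S0 c, pvAdj x q) ∧
  S0 ⊆ pvMkS mat a mark ∧
  pvMkS mat a mark ⊆ S0 ∪ pvReach mat a S0 c ∧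
  (∀ p ∈ pvMkS mat a mark, p ∉ S0 →
      ∀ q, pvStepR mat a S0 p q → q ∈ pvMkS mat a mark ∨ q ∈ stack) ∧
  (c ∈ pvMkS mat a mark ∨ c ∈ stack) ∧
  (∀ p, pvInG mat p → p ∉ pvReach mat a S0 c → pvCell mark p.1 p.2 = pvCell mark0 p.1 p.2)

theorem pvConclB_of_done (mat : List (List Int)) (a : Int) (S0 : Set (Int × Int))
    (c : Int × Int) (mark0 mark : List (List Int)) (cnt : Int) (hc : c ∉ S0)
    (hInv : pvInvB mat a S0 c mark0 mark []) :
    pvConcl mat a S0 c mark0 mark cnt (cnt, mark) := by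
  obtain ⟨hsh, _, hS0, hsub, hcl, hcM, hunch⟩ := hInv
  have hcM' : c ∈ pvMkS mat a mark := by
    rcases hcM with h | h
    · exact h
    · simp at h
  refine ⟨hsh, hunch, ?_, by simp⟩
  apply Set.Subset.antisymm hsub
  rintro p (hp | hp)
  · exact hS0 hp
  · refine pvReach_sub_MkS mat a S0 c mark hc hcM' ?_ hp
    intro p hpM hpS0 q hs
    rcases hcl p hpM hpS0 q hs with h | h
    · exact h
    · simp at h

theorem dfsLoopB_spec (mat : List (List Int)) (a : Int) (S0 : Set (Int × Int))
    (c : Int × Int) (mark0 : List (List Int)) (hc : c ∉ S0) (hgood : pvGood mat a c) :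
    ∀ (fuel : Nat) (mark : List (List Int)) (stack : List (Int × Int)) (cnt : Int),
    pvInvB mat a S0 c mark0 mark stack →
    stack.length + 4 * (pvN mat - pvCnt a mark) ≤ fuel →
    pvConcl mat a S0 c mark0 mark cnt
      (dfsLoopB mat (mat.length : Int) ((mat.getD 0 []).length : Int) a fuel mark stack cnt) := by
  intro fuel
  induction fuel with
  | zero =>
    intro mark stack cnt hInv hfuel
    have hq : stack = [] := by
      cases stack with
      | nil => rfl
      | cons p ps => simp at hfuel
    subst hq
    exact pvConclB_of_done mat a S0 c mark0 mark cnt hc hInv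
  | succ fuel ih =>
    intro mark stack cnt hInv hfuel
    cases stack with
    | nil => exact pvConclB_of_done mat a S0 c mark0 mark cnt hc hInv
    | cons xy rest =>
      obtain ⟨x, y⟩ := xy
      obtain ⟨hsh, hstOK, hS0, hsub, hcl, hcM, hunch⟩ := hInv
      simp only [dfsLoopB]
      set q : Int × Int := (x, y) with hqdef
      by_cases hg : (0 ≤ x ∧ x < (mat.length : Int) ∧ 0 ≤ y ∧
          y < ((mat.getD 0 []).length : Int) ∧ pvCell mark x y ≠ a ∧
          a ≤ pvCell mat x y ∧ pvCell mat x y ≤ a + 1)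
      · rw [if_pos hg]
        have hqIG : pvInG mat q := ⟨hg.1, hg.2.1, hg.2.2.1, hg.2.2.2.1⟩
        have hcell : pvCell mark q.1 q.2 ≠ a := hg.2.2.2.2.1
        have hqGood : pvGood mat a q := ⟨hqIG, hg.2.2.2.2.2.1, hg.2.2.2.2.2.2⟩
        have hqnM : q ∉ pvMkS mat a mark := fun h => hcell h.2
        have hqnS0 : q ∉ S0 := fun h => hqnM (hS0 h)
        have hqR : q ∈ pvReach mat a S0 c := by
          rcases hstOK q List.mem_cons_self with h | ⟨x', hx'R, hadj⟩
          · subst h; exact Relation.ReflTransGen.refl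
          · exact Relation.ReflTransGen.tail hx'R ⟨hadj, hqGood, hqnS0⟩
        have hsh' : pvShape mat (pvSet mark q.1 q.2 a) := pvShape_set mat mark q.1 q.2 a hsh
        have hMkS' : pvMkS mat a (pvSet mark q.1 q.2 a) = pvMkS mat a mark ∪ {q} :=
          pvMkS_set mat mark hsh q hqIG a
        have hmono : pvMkS mat a mark ⊆ pvMkS mat a (pvSet mark q.1 q.2 a) := by
          rw [hMkS']; exact Set.subset_union_left
        have hqM' : q ∈ pvMkS mat a (pvSet mark q.1 q.2 a) := by rw [hMkS']; right; rfl
        have hpush : ∀ p ∈ [(x, y - 1), (x + 1, y), (x, y + 1), (x - 1, y)], pvAdj q p := by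
          intro p hp
          fin_cases hp
          · exact ⟨(0, -1), by simp [pvDirs],
              by show (x, y - 1) = (x + 0, y + (-1)); rw [add_zero, ← sub_eq_add_neg]⟩
          · exact ⟨(1, 0), by simp [pvDirs],
              by show (x + 1, y) = (x + 1, y + 0); rw [add_zero]⟩
          · exact ⟨(0, 1), by simp [pvDirs],
              by show (x, y + 1) = (x + 0, y + 1); rw [add_zero]⟩
          · exact ⟨(-1, 0), by simp [pvDirs],
              by show (x - 1, y) = (x + (-1), y + 0); rw [add_zero, ← sub_eq_add_neg]⟩
        have hInv' : pvInvB mat a S0 c mark0 (pvSet mark q.1 q.2 a)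
            ((x, y - 1) :: (x + 1, y) :: (x, y + 1) :: (x - 1, y) :: rest) := by
          refine ⟨hsh', ?_, fun p hp => hmono (hS0 hp), ?_, ?_, ?_, ?_⟩
          · intro p hp
            rcases (by simpa using hp : p = (x, y - 1) ∨ p = (x + 1, y) ∨ p = (x, y + 1) ∨
                p = (x - 1, y) ∨ p ∈ rest) with h | h | h | h | h
            · exact Or.inr ⟨q, hqR, hpush p (by simp [h])⟩
            · exact Or.inr ⟨q, hqR, hpush p (by simp [h])⟩
            · exact Or.inr ⟨q, hqR, hpush p (by simp [h])⟩
            · exact Or.inr ⟨q, hqR, hpush p (by simp [h])⟩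
            · exact hstOK p (List.mem_cons_of_mem _ h)
          · rw [hMkS']
            rintro p (hp | hp)
            · exact hsub hp
            · simp only [Set.mem_singleton_iff] at hp; subst hp; exact Or.inr hqR
          · intro p hpM hpS0 q2 hs
            rw [hMkS'] at hpM
            rcases hpM with hpM | hpM
            · rcases hcl p hpM hpS0 q2 hs with h | h
              · exact Or.inl (hmono h)
              · rcases List.mem_cons.mp h with h | h
                · exact Or.inl (h ▸ hqM')
                · exact Or.inr (by simp [h])
            · simp only [Set.mem_singleton_iff] at hpM; subst hpM
              obtain ⟨⟨d, hd, he⟩, _, _⟩ := hs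
              right
              subst he
              fin_cases hd <;> simp [hqdef, sub_eq_add_neg]
          · rcases hcM with h | h
            · exact Or.inl (hmono h)
            · rcases List.mem_cons.mp h with h | h
              · exact Or.inl (h ▸ hqM')
              · exact Or.inr (by simp [h])
          · intro p hpIG hpR
            have hpq : p ≠ q := fun h => hpR (h ▸ hqR)
            rw [pvCell_set_other mat mark hsh q p hqIG hpIG hpq a]
            exact hunch p hpIG hpR
        have hcnt' : pvCnt a (pvSet mark q.1 q.2 a) = pvCnt a mark + 1 :=
          pvCnt_set mat mark hsh q hqIG a hcell
        have hcle2 := pvCnt_le mat mark hsh a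
        have hcle3 : pvCnt a mark + 1 ≤ pvN mat := by
          have := pvCnt_le mat (pvSet mark q.1 q.2 a) hsh' a
          rw [hcnt'] at this
          exact this
        have hfuel' : ((x, y - 1) :: (x + 1, y) :: (x, y + 1) :: (x - 1, y) :: rest).length
            + 4 * (pvN mat - pvCnt a (pvSet mark q.1 q.2 a)) ≤ fuel := by
          simp only [List.length_cons] at hfuel ⊢
          rw [hcnt']
          rw [pvN] at *
          omega
        obtain ⟨hC1, hC2, hC3, hC4⟩ := ih (pvSet mark q.1 q.2 a)
          ((x, y - 1) :: (x + 1, y) :: (x, y + 1) :: (x - 1, y) :: rest) (cnt + 1) hInv' hfuel'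
        refine ⟨hC1, hC2, hC3, ?_⟩
        rw [hC4, hcnt']
        push_cast
        ring
      · rw [if_neg hg]
        have hqMkS_of : (pvGood mat a q → q ∈ pvMkS mat a mark) := by
          intro hq
          obtain ⟨⟨g1, g2, g3, g4⟩, g5, g6⟩ := hq
          by_contra hqM
          exact hg ⟨g1, g2, g3, g4, fun hcc => hqM ⟨⟨g1, g2, g3, g4⟩, hcc⟩, g5, g6⟩
        have hInv' : pvInvB mat a S0 c mark0 mark rest := by
          refine ⟨hsh, fun p hp => hstOK p (List.mem_cons_of_mem _ hp), hS0, hsub, ?_, ?_, hunch⟩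
          · intro p hpM hpS0 q2 hs
            rcases hcl p hpM hpS0 q2 hs with h | h
            · exact Or.inl h
            · rcases List.mem_cons.mp h with h | h
              · exact Or.inl (h ▸ hqMkS_of (h ▸ hs.2.1))
              · exact Or.inr h
          · rcases hcM with h | h
            · exact Or.inl h
            · rcases List.mem_cons.mp h with h | h
              · exact Or.inl (h ▸ hqMkS_of (h ▸ hgood))
              · exact Or.inr h
        have hfuel' : rest.length + 4 * (pvN mat - pvCnt a mark) ≤ fuel := by
          simp only [List.length_cons] at hfuel
          omega
        exact ih mark rest cnt hInv' hfuel'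

-- Per-call characterization --------------------------------------------------------

def pvPost (mat : List (List Int)) (a : Int) (c : Int × Int) (mark : List (List Int)) :
    Set (Int × Int) :=
  pvMkS mat a mark ∪
    {q | (pvGood mat a c ∧ c ∉ pvMkS mat a mark) ∧ q ∈ pvReach mat a (pvMkS mat a mark) c}

def pvCallOut (mat : List (List Int)) (a : Int) (c : Int × Int) (mark : List (List Int))
    (out : Int × List (List Int)) : Prop :=
  pvShape mat out.2 ∧
  (∀ p, pvInG mat p → (pvCell out.2 p.1 p.2 = a ↔ p ∈ pvPost mat a c mark)) ∧
  (∀ p, pvInG mat p → p ∉ pvPost mat a c mark → pvCell out.2 p.1 p.2 = pvCell mark p.1 p.2) ∧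
  out.1 = (pvCnt a out.2 : Int) - (pvCnt a mark : Int)

theorem pvCallOut_triv (mat : List (List Int)) (a : Int) (c : Int × Int)
    (mark : List (List Int)) (hsh : pvShape mat mark)
    (hn : ¬(pvGood mat a c ∧ c ∉ pvMkS mat a mark)) :
    pvCallOut mat a c mark (0, mark) := by
  have hpost : pvPost mat a c mark = pvMkS mat a mark := by
    rw [pvPost]
    apply Set.union_eq_self_of_subset_right
    rintro q ⟨hcond, _⟩
    exact absurd hcond hn
  refine ⟨hsh, ?_, ?_, by simp⟩
  · intro p hIG
    rw [hpost]
    exact ⟨fun h => ⟨hIG, h⟩, fun h => h.2⟩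
  · intro p _ _
    rfl

theorem pvCallOut_good (mat : List (List Int)) (a : Int) (c : Int × Int)
    (mark : List (List Int)) (hsh : pvShape mat mark)
    (hgood : pvGood mat a c) (hnS : c ∉ pvMkS mat a mark)
    (out : Int × List (List Int))
    (hconcl : pvConcl mat a (pvMkS mat a mark) c mark mark 0 out) :
    pvCallOut mat a c mark out := by
  obtain ⟨hC1, hC2, hC3, hC4⟩ := hconcl
  have hpost : pvPost mat a c mark
      = pvMkS mat a mark ∪ pvReach mat a (pvMkS mat a mark) c := by
    rw [pvPost]
    congr 1
    ext q
    exact ⟨fun h => h.2, fun h => ⟨⟨hgood, hnS⟩, h⟩⟩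
  refine ⟨hC1, ?_, ?_, by rw [hC4]; ring⟩
  · intro p hIG
    rw [hpost, ← hC3]
    exact ⟨fun h => ⟨hIG, h⟩, fun h => h.2⟩
  · intro p hIG hp
    rw [hpost] at hp
    exact hC2 p hIG (fun h => hp (Or.inr h))

theorem callA_spec (mat : List (List Int)) (a : Int) (c : Int × Int)
    (mark : List (List Int)) (hsh : pvShape mat mark) (hIG : pvInG mat c) :
    pvCallOut mat a c mark
      (bfsA mat (mat.length : Int) ((mat.getD 0 []).length : Int) a c.1 c.2 mark) := by
  rw [bfsA]
  by_cases hcond : (pvCell mark c.1 c.2 = a ∨ pvCell mat c.1 c.2 < a ∨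
      a + 1 < pvCell mat c.1 c.2)
  · rw [if_pos hcond]
    apply pvCallOut_triv mat a c mark hsh
    rintro ⟨⟨_, hb1, hb2⟩, hnM⟩
    rcases hcond with h | h | h
    · exact hnM ⟨hIG, h⟩
    · omega
    · omega
  · rw [if_neg hcond]
    push_neg at hcond
    obtain ⟨hcell, hb1, hb2⟩ := hcond
    have hgood : pvGood mat a c := ⟨hIG, hb1, hb2⟩
    have hnS : c ∉ pvMkS mat a mark := fun h => hcell h.2
    apply pvCallOut_good mat a c mark hsh hgood hnS
    set S0 := pvMkS mat a mark with hS0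
    have hsh1 : pvShape mat (pvSet mark c.1 c.2 a) := pvShape_set mat mark c.1 c.2 a hsh
    have hMkS1 : pvMkS mat a (pvSet mark c.1 c.2 a) = S0 ∪ {c} :=
      pvMkS_set mat mark hsh c hIG a
    have hcR : c ∈ pvReach mat a S0 c := Relation.ReflTransGen.refl
    have hcM1 : c ∈ pvMkS mat a (pvSet mark c.1 c.2 a) := by rw [hMkS1]; right; rfl
    have hInv : pvInvA mat a S0 c mark (pvSet mark c.1 c.2 a) [(c.1, c.2)] := by
      refine ⟨hsh1, ?_, ?_, ?_, ?_, hcM1, ?_⟩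
      · intro p hp
        simp only [List.mem_singleton] at hp
        subst hp
        exact ⟨hcM1, hnS⟩
      · intro p hp
        rw [hMkS1]; exact Or.inl hp
      · rw [hMkS1]
        rintro p (hp | hp)
        · exact Or.inl hp
        · simp only [Set.mem_singleton_iff] at hp; subst hp; exact Or.inr hcR
      · intro p hpM hpS0 hpq q hs
        rw [hMkS1] at hpM
        rcases hpM with hpM | hpM
        · exact absurd hpM hpS0
        · simp only [Set.mem_singleton_iff] at hpM
          subst hpM
          exact absurd (by simp : p ∈ [(p.1, p.2)]) hpq
      · intro p hpIG hpR
        have hpc : p ≠ c := fun h => hpR (h ▸ hcR)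
        exact pvCell_set_other mat mark hsh c p hIG hpIG hpc a
    have hcnt1 : pvCnt a (pvSet mark c.1 c.2 a) = pvCnt a mark + 1 :=
      pvCnt_set mat mark hsh c hIG a hcell
    have hcle : pvCnt a (pvSet mark c.1 c.2 a) ≤ pvN mat := pvCnt_le mat _ hsh1 a
    have hfuel : ([(c.1, c.2)] : List (Int × Int)).length
        + (pvN mat - pvCnt a (pvSet mark c.1 c.2 a))
        ≤ ((mat.length : Int).toNat * (((mat.getD 0 []).length : Int)).toNat + 1) := by
      simp only [List.length_singleton, Int.toNat_natCast]
      rw [pvN] at *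
      omega
    have := bfsLoopA_spec mat a S0 c mark hnS
      ((mat.length : Int).toNat * (((mat.getD 0 []).length : Int)).toNat + 1)
      (pvSet mark c.1 c.2 a) [(c.1, c.2)] 1 hInv hfuel
    obtain ⟨hC1, hC2, hC3, hC4⟩ := this
    refine ⟨hC1, hC2, hC3, ?_⟩
    rw [hC4, hcnt1]
    push_cast
    ring

theorem dfsLoopB_nil (mat : List (List Int)) (m n a : Int) (fuel : Nat)
    (mark : List (List Int)) (cnt : Int) :
    dfsLoopB mat m n a fuel mark [] cnt = (cnt, mark) := by
  cases fuel <;> simp [dfsLoopB]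

theorem callB_spec (mat : List (List Int)) (a : Int) (c : Int × Int)
    (mark : List (List Int)) (hsh : pvShape mat mark) (hIG : pvInG mat c) :
    pvCallOut mat a c mark
      (dfsLoopB mat (mat.length : Int) ((mat.getD 0 []).length : Int) a
        (4 * mat.length * (mat.getD 0 []).length + 1) mark [c] 0) := by
  by_cases hcond : (pvGood mat a c ∧ c ∉ pvMkS mat a mark)
  · obtain ⟨hgood, hnS⟩ := hcond
    apply pvCallOut_good mat a c mark hsh hgood hnS
    have hInv : pvInvB mat a (pvMkS mat a mark) c mark mark [c] := by
      refine ⟨hsh, ?_, fun p hp => hp, fun p hp => Or.inl hp, ?_, ?_, ?_⟩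
      · intro p hp
        simp only [List.mem_singleton] at hp
        exact Or.inl hp
      · intro p hpM hpS0 q hs
        exact absurd hpM hpS0
      · exact Or.inr (by simp)
      · intro p _ _
        rfl
    have hfuel : ([c] : List (Int × Int)).length + 4 * (pvN mat - pvCnt a mark)
        ≤ 4 * mat.length * (mat.getD 0 []).length + 1 := by
      have := pvCnt_le mat mark hsh a
      simp only [List.length_singleton]
      have h4 : 4 * mat.length * (mat.getD 0 []).length
          = 4 * (mat.length * (mat.getD 0 []).length) := by ring
      rw [pvN, h4]
      omega
    exact dfsLoopB_spec mat a (pvMkS mat a mark) c mark hnS hgood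
      (4 * mat.length * (mat.getD 0 []).length + 1) mark [c] 0 hInv hfuel
  · -- the first (and only) pop fails the guard
    have hguard : ¬(0 ≤ c.1 ∧ c.1 < (mat.length : Int) ∧ 0 ≤ c.2 ∧
        c.2 < ((mat.getD 0 []).length : Int) ∧ pvCell mark c.1 c.2 ≠ a ∧
        a ≤ pvCell mat c.1 c.2 ∧ pvCell mat c.1 c.2 ≤ a + 1) := by
      rintro ⟨g1, g2, g3, g4, g5, g6, g7⟩
      exact hcond ⟨⟨⟨g1, g2, g3, g4⟩, g6, g7⟩, fun h => g5 h.2⟩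
    have : dfsLoopB mat (mat.length : Int) ((mat.getD 0 []).length : Int) a
        (4 * mat.length * (mat.getD 0 []).length + 1) mark [c] 0
        = dfsLoopB mat (mat.length : Int) ((mat.getD 0 []).length : Int) a
          (4 * mat.length * (mat.getD 0 []).length) mark [] 0 := by
      show dfsLoopB mat (mat.length : Int) ((mat.getD 0 []).length : Int) a
        (4 * mat.length * (mat.getD 0 []).length + 1) mark [(c.1, c.2)] 0 = _
      simp only [dfsLoopB, if_neg hguard]
    rw [this, dfsLoopB_nil]
    exact pvCallOut_triv mat a c mark hsh hcond

theorem pvCallOut_unique (mat : List (List Int)) (a : Int) (c : Int × Int)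
    (mark : List (List Int)) (hsh : pvShape mat mark) (o1 o2 : Int × List (List Int))
    (h1 : pvCallOut mat a c mark o1) (h2 : pvCallOut mat a c mark o2) : o1 = o2 := by
  obtain ⟨hsh1, hiff1, hun1, hr1⟩ := h1
  obtain ⟨hsh2, hiff2, hun2, hr2⟩ := h2
  have hmk : o1.2 = o2.2 := by
    apply pvShape_ext mat o1.2 o2.2 hsh1 hsh2
    intro p hIG
    by_cases hp : p ∈ pvPost mat a c mark
    · rw [(hiff1 p hIG).mpr hp, (hiff2 p hIG).mpr hp]
    · rw [hun1 p hIG hp, hun2 p hIG hp]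
  have : o1.1 = o2.1 := by rw [hr1, hr2, hmk]
  exact Prod.ext this hmk

theorem call_eq (mat : List (List Int)) (a : Int) (c : Int × Int)
    (mark : List (List Int)) (hsh : pvShape mat mark) (hIG : pvInG mat c) :
    bfsA mat (mat.length : Int) ((mat.getD 0 []).length : Int) a c.1 c.2 mark
      = dfsLoopB mat (mat.length : Int) ((mat.getD 0 []).length : Int) a
        (4 * mat.length * (mat.getD 0 []).length + 1) mark [c] 0 :=
  pvCallOut_unique mat a c mark hsh _ _ (callA_spec mat a c mark hsh hIG)
    (callB_spec mat a c mark hsh hIG)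

theorem callA_shape (mat : List (List Int)) (a : Int) (c : Int × Int)
    (mark : List (List Int)) (hsh : pvShape mat mark) (hIG : pvInG mat c) :
    pvShape mat
      (bfsA mat (mat.length : Int) ((mat.getD 0 []).length : Int) a c.1 c.2 mark).2 :=
  (callA_spec mat a c mark hsh hIG).1

-- Outer loops ---------------------------------------------------------------------

theorem max_eq_if (g r : Int) : max g r = if r > g then r else g := by
  rw [max_def]
  split_ifs <;> omega

theorem foldJ_eq (mat : List (List Int)) (a i : Int) (hi0 : 0 ≤ i)
    (hi1 : i < (mat.length : Int)) :
    ∀ (js : List Int), (∀ j ∈ js, 0 ≤ j ∧ j < ((mat.getD 0 []).length : Int)) →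
    ∀ (st0 : Int × List (List Int)), pvShape mat st0.2 →
    (js.foldl (fun st j =>
        let res := bfsA mat (mat.length : Int) ((mat.getD 0 []).length : Int) a i j st.2
        (max st.1 res.1, res.2)) st0
      = js.foldl (fun st j =>
        let res := dfsLoopB mat (mat.length : Int) ((mat.getD 0 []).length : Int) a
          (4 * mat.length * (mat.getD 0 []).length + 1) st.2 [(i, j)] 0
        (if res.1 > st.1 then res.1 else st.1, res.2)) st0)
    ∧ pvShape mat (js.foldl (fun st j =>
        let res := bfsA mat (mat.length : Int) ((mat.getD 0 []).length : Int) a i j st.2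
        (max st.1 res.1, res.2)) st0).2 := by
  intro js
  induction js with
  | nil =>
    intro _ st0 hsh
    exact ⟨rfl, hsh⟩
  | cons j js ih =>
    intro hjs st0 hsh
    have hj := hjs j List.mem_cons_self
    have hIG : pvInG mat (i, j) := ⟨hi0, hi1, hj.1, hj.2⟩
    have hceq := call_eq mat a (i, j) st0.2 hsh hIG
    have hshA : pvShape mat
        (bfsA mat (mat.length : Int) ((mat.getD 0 []).length : Int) a i j st0.2).2 :=
      callA_shape mat a (i, j) st0.2 hsh hIG
    have hinit : ((max st0.1 (bfsA mat (mat.length : Int) ((mat.getD 0 []).length : Int) a i j st0.2).1,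
          (bfsA mat (mat.length : Int) ((mat.getD 0 []).length : Int) a i j st0.2).2) : Int × List (List Int))
        = ((if (dfsLoopB mat (mat.length : Int) ((mat.getD 0 []).length : Int) a
              (4 * mat.length * (mat.getD 0 []).length + 1) st0.2 [(i, j)] 0).1 > st0.1
            then (dfsLoopB mat (mat.length : Int) ((mat.getD 0 []).length : Int) a
              (4 * mat.length * (mat.getD 0 []).length + 1) st0.2 [(i, j)] 0).1 else st0.1),
          (dfsLoopB mat (mat.length : Int) ((mat.getD 0 []).length : Int) a
            (4 * mat.length * (mat.getD 0 []).length + 1) st0.2 [(i, j)] 0).2) := by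
      rw [← hceq, max_eq_if]
    have hih := ih (fun j' hj' => hjs j' (List.mem_cons_of_mem _ hj'))
      (max st0.1 (bfsA mat (mat.length : Int) ((mat.getD 0 []).length : Int) a i j st0.2).1,
        (bfsA mat (mat.length : Int) ((mat.getD 0 []).length : Int) a i j st0.2).2) hshA
    exact ⟨hih.1.trans (congrArg (fun s => List.foldl _ s js) hinit), hih.2⟩

theorem foldI_eq (mat : List (List Int)) (a : Int) :
    ∀ (is : List Int), (∀ i ∈ is, 0 ≤ i ∧ i < (mat.length : Int)) →
    ∀ (st0 : Int × List (List Int)), pvShape mat st0.2 →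
    (is.foldl (fun st i =>
        (PySem.List.pyRange 0 ((mat.getD 0 []).length : Int) 1).foldl (fun st j =>
          let res := bfsA mat (mat.length : Int) ((mat.getD 0 []).length : Int) a i j st.2
          (max st.1 res.1, res.2)) st) st0
      = is.foldl (fun st i =>
        (PySem.List.pyRange 0 ((mat.getD 0 []).length : Int) 1).foldl (fun st j =>
          let res := dfsLoopB mat (mat.length : Int) ((mat.getD 0 []).length : Int) a
            (4 * mat.length * (mat.getD 0 []).length + 1) st.2 [(i, j)] 0
          (if res.1 > st.1 then res.1 else st.1, res.2)) st) st0)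
    ∧ pvShape mat (is.foldl (fun st i =>
        (PySem.List.pyRange 0 ((mat.getD 0 []).length : Int) 1).foldl (fun st j =>
          let res := bfsA mat (mat.length : Int) ((mat.getD 0 []).length : Int) a i j st.2
          (max st.1 res.1, res.2)) st) st0).2 := by
  intro is
  induction is with
  | nil =>
    intro _ st0 hsh
    exact ⟨rfl, hsh⟩
  | cons i is ih =>
    intro his st0 hsh
    have hi := his i List.mem_cons_self
    have hjs : ∀ j ∈ PySem.List.pyRange 0 ((mat.getD 0 []).length : Int) 1,
        0 ≤ j ∧ j < ((mat.getD 0 []).length : Int) := by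
      intro j hj
      exact (PySem.List.mem_pyRange_one).mp hj
    obtain ⟨hfeq, hfsh⟩ := foldJ_eq mat a i hi.1 hi.2
      (PySem.List.pyRange 0 ((mat.getD 0 []).length : Int) 1) hjs st0 hsh
    have hih := ih (fun i' hi' => his i' (List.mem_cons_of_mem _ hi'))
      ((PySem.List.pyRange 0 ((mat.getD 0 []).length : Int) 1).foldl (fun st j =>
        let res := bfsA mat (mat.length : Int) ((mat.getD 0 []).length : Int) a i j st.2
        (max st.1 res.1, res.2)) st0) hfsh
    exact ⟨hih.1.trans (congrArg (fun s => List.foldl _ s is) hfeq), hih.2⟩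

theorem foldAout_eq (mat : List (List Int)) :
    ∀ (as : List Int) (st0 : Int × List (List Int)), pvShape mat st0.2 →
    (as.foldl (fun st a =>
        (PySem.List.pyRange 0 (mat.length : Int) 1).foldl (fun st i =>
          (PySem.List.pyRange 0 ((mat.getD 0 []).length : Int) 1).foldl (fun st j =>
            let res := bfsA mat (mat.length : Int) ((mat.getD 0 []).length : Int) a i j st.2
            (max st.1 res.1, res.2)) st) st) st0
      = as.foldl (fun st a =>
        (PySem.List.pyRange 0 (mat.length : Int) 1).foldl (fun st i =>
          (PySem.List.pyRange 0 ((mat.getD 0 []).length : Int) 1).foldl (fun st j =>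
            let res := dfsLoopB mat (mat.length : Int) ((mat.getD 0 []).length : Int) a
              (4 * mat.length * (mat.getD 0 []).length + 1) st.2 [(i, j)] 0
            (if res.1 > st.1 then res.1 else st.1, res.2)) st) st) st0) := by
  intro as
  induction as with
  | nil => intro st0 _; rfl
  | cons a as ih =>
    intro st0 hsh
    have his : ∀ i ∈ PySem.List.pyRange 0 (mat.length : Int) 1,
        0 ≤ i ∧ i < (mat.length : Int) := by
      intro i hi
      exact (PySem.List.mem_pyRange_one).mp hi
    obtain ⟨hfeq, hfsh⟩ := foldI_eq mat a
      (PySem.List.pyRange 0 (mat.length : Int) 1) his st0 hsh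
    have hih := ih ((PySem.List.pyRange 0 (mat.length : Int) 1).foldl (fun st i =>
        (PySem.List.pyRange 0 ((mat.getD 0 []).length : Int) 1).foldl (fun st j =>
          let res := bfsA mat (mat.length : Int) ((mat.getD 0 []).length : Int) a i j st.2
          (max st.1 res.1, res.2)) st) st0) hfsh
    exact hih.trans (congrArg (fun s => List.foldl _ s as) hfeq)

theorem pvShape_mark0 (mat : List (List Int)) :
    pvShape mat (List.replicate mat.length (List.replicate (mat.getD 0 []).length (-1))) := by
  refine ⟨by simp, ?_⟩
  intro row hrow
  rw [List.eq_of_mem_replicate hrow]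
  simp

-- ===== VERDICT (by name: the statement is the Claim_ definition above) =====
theorem find_group_size_spec : Claim_equal_find_group_size := by
  intro inp_mat _ _
  show find_group_size inp_mat = find_group_size_alt inp_mat
  exact congrArg Prod.fst (foldAout_eq inp_mat (PySem.List.pyRange 0 10 1)
    (0, List.replicate inp_mat.length (List.replicate (inp_mat.getD 0 []).length (-1)))
    (pvShape_mark0 inp_mat))
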